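-- pv_equiv track=rewrite | github.com/tannavee/Portfolio | Data Structures/SearchFunctions.py | ternarySearchRec
-- ===== SOURCE A (Python) =====
-- def ternarySearchRec(alist, item): # defining the recursive function
--     if alist == []: # base case, if list is empty
--         return False # user will see false
--     else:
--         midpoint1 = len(alist)//3 # mdpt1 at index at 1/3 mark
--         midpoint2 = (len(alist) * 2)//3 # mdpt2 at index at 2/3 mark
--         if (alist[midpoint1] == item) or (alist[midpoint2] == item):
--             return True # true if item = mdpt 1 or mdpt2
--         elif item < alist[midpoint1]: # if item < mdpt 1
--             # base case is the slicing part, recrusily calls from 0, to the value before mdpt1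
--             return ternarySearchRec(alist[:midpoint1], item)
--         elif item > alist[midpoint2]: # if item > mdpt 2
--             # base case is the slicing part, recrusily calls from value after mdpt2
--             # to last value
--             return ternarySearchRec(alist[midpoint2 + 1:], item)
--         else: # if item is in between the mdpts
--             # base case is the slicing part, recrusily calls from value after mdpt1
--             # to value before mdpt2
--             return ternarySearchRec(alist[midpoint1 + 1:midpoint2], item)
-- ===== SOURCE B (Python) =====
-- def ternarySearchRec(alist, item):
--     # Iterative index-based ternary search: lo/hi bounds, no slicing.
--     lo, hi = 0, len(alist)
--     while lo < hi:
--         n = hi - lo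
--         m1 = lo + n // 3
--         m2 = lo + (n * 2) // 3
--         if alist[m1] == item or alist[m2] == item:
--             return True
--         if item < alist[m1]:
--             hi = m1
--         elif item > alist[m2]:
--             lo = m2 + 1
--         else:
--             lo, hi = m1 + 1, m2
--     return False
-- ===== Notes on version B (the rewrite author's own statement) =====
-- stated objective: alternative
-- what changed: Replaced A's recursion that copies a list slice at every step with an iterative ternary search over lo/hi index bounds on the original list, so no slices are built.
import Mathlib
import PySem

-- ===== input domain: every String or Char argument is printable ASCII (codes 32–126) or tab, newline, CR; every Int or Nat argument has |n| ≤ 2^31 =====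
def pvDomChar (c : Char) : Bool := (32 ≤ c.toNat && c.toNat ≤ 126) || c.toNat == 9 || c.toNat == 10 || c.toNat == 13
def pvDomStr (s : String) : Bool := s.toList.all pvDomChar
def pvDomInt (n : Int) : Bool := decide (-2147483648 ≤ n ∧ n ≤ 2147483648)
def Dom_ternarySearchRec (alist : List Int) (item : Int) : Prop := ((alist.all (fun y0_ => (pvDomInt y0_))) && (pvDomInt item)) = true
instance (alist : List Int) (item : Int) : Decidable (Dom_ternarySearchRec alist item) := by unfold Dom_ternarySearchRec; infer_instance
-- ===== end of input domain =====

-- B replaces A's list-slicing recursion by an iterative index-based ternary search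
-- over lo/hi bounds on the original list (objective: alternative — no slice copies).


-- ===== PORT A =====
-- Python A's recursion, with a fuel parameter as totality guard only: each call
-- strictly shrinks the list, so fuel = alist.length never runs out (fuel 0 is
-- reached only with alist = [], where A returns False anyway).
-- alist[midpoint1] / alist[midpoint2] are always in range when alist ≠ []
-- (midpoint1 ≤ midpoint2 < len), so `getD _ 0` is exactly Python's indexing;
-- the three slices are PySem.List.slice.
def tsA (fuel : Nat) (alist : List Int) (item : Int) : Bool :=
  match fuel with
  | 0 => false
  | fuel + 1 =>
    if alist = [] then false
    else
      let midpoint1 := alist.length / 3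
      let midpoint2 := alist.length * 2 / 3
      if alist.getD midpoint1 0 = item ∨ alist.getD midpoint2 0 = item then true
      else if item < alist.getD midpoint1 0 then
        tsA fuel (PySem.List.slice alist none (some (midpoint1 : Int))) item
      else if item > alist.getD midpoint2 0 then
        tsA fuel (PySem.List.slice alist (some ((midpoint2 : Int) + 1)) none) item
      else
        tsA fuel (PySem.List.slice alist (some ((midpoint1 : Int) + 1)) (some (midpoint2 : Int))) item

def ternarySearchRec (alist : List Int) (item : Int) : Bool :=
  tsA alist.length alist item

-- ===== PORT B =====
-- The while loop of Source B as tail recursion; fuel is again only a totality guard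
-- (the window hi - lo strictly shrinks, so fuel = alist.length suffices).
def tsLoop (fuel : Nat) (alist : List Int) (item : Int) (lo hi : Nat) : Bool :=
  match fuel with
  | 0 => false
  | fuel + 1 =>
    if lo < hi then
      let m1 := lo + (hi - lo) / 3
      let m2 := lo + (hi - lo) * 2 / 3
      if alist.getD m1 0 = item ∨ alist.getD m2 0 = item then true
      else if item < alist.getD m1 0 then tsLoop fuel alist item lo m1
      else if item > alist.getD m2 0 then tsLoop fuel alist item (m2 + 1) hi
      else tsLoop fuel alist item (m1 + 1) m2
    else false

def ternarySearchRec_alt (alist : List Int) (item : Int) : Bool :=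
  tsLoop alist.length alist item 0 alist.length

-- ===== PRECONDITION & SPEC =====
def Spec_ternarySearchRec (alist : List Int) (item : Int) (out : Bool) : Prop := out = ternarySearchRec_alt alist item
instance (alist : List Int) (item : Int) (out : Bool) : Decidable (Spec_ternarySearchRec alist item out) := by unfold Spec_ternarySearchRec; infer_instance

-- ===== CLAIM (what is proved, stated in full; the proofs are below) =====
def Claim_equal_ternarySearchRec : Prop := ∀ (alist : List Int) (item : Int), Dom_ternarySearchRec alist item → Spec_ternarySearchRec alist item (ternarySearchRec alist item)

-- ===== LEMMAS AND PROOFS =====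

-- Reading index k of the window alist[lo:hi] is reading index lo+k of alist.
theorem window_getD (alist : List Int) (lo hi k : Nat) (hk : lo + k < hi) :
    ((alist.take hi).drop lo).getD k 0 = alist.getD (lo + k) 0 := by
  simp only [List.getD_eq_getElem?_getD, List.getElem?_drop, List.getElem?_take]
  rw [if_pos hk]

-- Taking a prefix of the window alist[lo:hi] is the window alist[lo:lo+k].
theorem window_take (l : List Int) (lo hi k : Nat) (h : lo + k ≤ hi) :
    ((l.take hi).drop lo).take k = (l.take (lo + k)).drop lo := by
  rw [List.take_drop, List.take_take, Nat.min_eq_left h]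

-- Dropping a prefix of the window alist[lo:hi] is the window alist[lo+k:hi].
theorem window_drop (l : List Int) (lo hi k : Nat) :
    ((l.take hi).drop lo).drop k = (l.take hi).drop (lo + k) := by
  rw [List.drop_drop]

-- Invariant: with the same fuel, B's loop on bounds (lo, hi) computes A on the
-- window alist[lo:hi] (fuel bounds the window size on both sides).
theorem tsLoop_eq_tsA (alist : List Int) (item : Int) :
    ∀ fuel lo hi, hi - lo ≤ fuel → hi ≤ alist.length →
      tsLoop fuel alist item lo hi = tsA fuel ((alist.take hi).drop lo) item := by
  intro fuel
  induction fuel with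
  | zero => intro lo hi _ _; rfl
  | succ fuel ih =>
      intro lo hi hd hhi
      by_cases hlh : lo < hi
      · have hslen : ((alist.take hi).drop lo).length = hi - lo := by
          simp only [List.length_drop, List.length_take]; omega
        have hsne : (alist.take hi).drop lo ≠ [] := by
          intro h0; rw [h0] at hslen; simp at hslen; omega
        have hm1 : (hi - lo) / 3 < hi - lo := Nat.div_lt_self (by omega) (by omega)
        have hm2 : (hi - lo) * 2 / 3 < hi - lo := by
          have h3 : (hi - lo) * 3 / 3 = hi - lo := Nat.mul_div_cancel _ (by omega)
          have := Nat.div_le_div_right (c := 3) (Nat.mul_le_mul_left (hi - lo) (show 2 ≤ 3 by omega))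
          omega
        have hm12 : (hi - lo) / 3 ≤ (hi - lo) * 2 / 3 := Nat.div_le_div_right (by omega)
        have hkey : lo + (hi - lo) * 2 / 3 - (lo + ((hi - lo) / 3 + 1)) ≤ fuel := by omega
        have hkey2 : hi - (lo + ((hi - lo) * 2 / 3 + 1)) ≤ fuel := by omega
        have hkey3 : lo + (hi - lo) / 3 - lo ≤ fuel := by omega
        have hkey4 : lo + (hi - lo) * 2 / 3 ≤ alist.length := by omega
        have hkey5 : lo + (hi - lo) / 3 ≤ alist.length := by omega
        have hkey6 : lo + ((hi - lo) / 3 + 1) + ((hi - lo) * 2 / 3 - ((hi - lo) / 3 + 1)) ≤ hi := by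
          omega
        rw [tsLoop, tsA, if_pos hlh, if_neg hsne]
        simp only [hslen]
        rw [window_getD alist lo hi ((hi - lo) / 3) (by omega),
            window_getD alist lo hi ((hi - lo) * 2 / 3) (by omega)]
        by_cases hhit : alist.getD (lo + (hi - lo) / 3) 0 = item ∨
            alist.getD (lo + (hi - lo) * 2 / 3) 0 = item
        · rw [if_pos hhit, if_pos hhit]
        · rw [if_neg hhit, if_neg hhit]
          by_cases hlt : item < alist.getD (lo + (hi - lo) / 3) 0
          · rw [if_pos hlt, if_pos hlt, PySem.List.slice_to_natCast,
                window_take alist lo hi ((hi - lo) / 3) (by omega)]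
            exact ih lo (lo + (hi - lo) / 3) hkey3 hkey5
          · rw [if_neg hlt, if_neg hlt]
            by_cases hgt : item > alist.getD (lo + (hi - lo) * 2 / 3) 0
            · rw [if_pos hgt, if_pos hgt,
                  show (((hi - lo) * 2 / 3 : Nat) : Int) + 1
                    = (((hi - lo) * 2 / 3 + 1 : Nat) : Int) by push_cast; ring,
                  PySem.List.slice_from_natCast,
                  window_drop alist lo hi ((hi - lo) * 2 / 3 + 1),
                  show lo + (hi - lo) * 2 / 3 + 1 = lo + ((hi - lo) * 2 / 3 + 1) from by omega]
              exact ih (lo + ((hi - lo) * 2 / 3 + 1)) hi hkey2 hhi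
            · have hx : alist.getD (lo + (hi - lo) / 3) 0 < item :=
                lt_of_le_of_ne (not_lt.mp hlt) (fun he => hhit (Or.inl he))
              have hy : item < alist.getD (lo + (hi - lo) * 2 / 3) 0 :=
                lt_of_le_of_ne (not_lt.mp hgt) (fun he => hhit (Or.inr he.symm))
              have hab := hx.trans hy
              have hdiv : (hi - lo) / 3 ≠ (hi - lo) * 2 / 3 := by
                intro he; rw [he] at hab; exact lt_irrefl _ hab
              rw [if_neg hgt, if_neg hgt,
                  show (((hi - lo) / 3 : Nat) : Int) + 1
                    = (((hi - lo) / 3 + 1 : Nat) : Int) by push_cast; ring,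
                  PySem.List.slice_natCast,
                  window_drop alist lo hi ((hi - lo) / 3 + 1),
                  window_take alist (lo + ((hi - lo) / 3 + 1)) hi
                    ((hi - lo) * 2 / 3 - ((hi - lo) / 3 + 1)) hkey6]
              rw [show lo + ((hi - lo) / 3 + 1) + ((hi - lo) * 2 / 3 - ((hi - lo) / 3 + 1))
                    = lo + (hi - lo) * 2 / 3 by omega]
              rw [show lo + (hi - lo) / 3 + 1 = lo + ((hi - lo) / 3 + 1) from by omega]
              exact ih (lo + ((hi - lo) / 3 + 1)) (lo + (hi - lo) * 2 / 3) hkey hkey4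
      · rw [tsLoop, tsA, if_neg hlh,
            show (alist.take hi).drop lo = [] from
              List.eq_nil_of_length_eq_zero (by simp only [List.length_drop, List.length_take]; omega),
            if_pos rfl]

-- ===== VERDICT (by name: the statement is the Claim_ definition above) =====
theorem ternarySearchRec_spec : Claim_equal_ternarySearchRec := by
  intro alist item _
  unfold Spec_ternarySearchRec ternarySearchRec_alt ternarySearchRec
  rw [tsLoop_eq_tsA alist item alist.length 0 alist.length (by omega) (le_refl _)]
  simp
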